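-- pv_equiv track=rewrite | github.com/charm-lab/social_multiobject_tracking | multi_tracking.py | bipartiteCover
-- ===== SOURCE A (Python) =====
-- import itertools
--
-- def bipartiteCover(bounding_box_sets):
--     for i in range(1, len(bounding_box_sets)+1):
--         combinations = itertools.combinations(bounding_box_sets, i)
--         for combination in combinations:
--             combined_set = set([])
--             # box_set is actually the tactors
--
--             for box_set in combination:
--                 combined_set = combined_set | box_set
--             if len(combined_set) < i:
--                 return False
--     return True
-- ===== SOURCE B (Python) =====
-- def bipartiteCover(bounding_box_sets):
--     # Layered subset DP: layer holds (union, next-index) for every current-size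
--     # subset, built by extending the previous layer one set at a time; each
--     # subset's union is derived by a single union with one more set, and
--     # subsets are checked in the same size-then-lexicographic order as the
--     # combinations-based version.
--     sets = list(bounding_box_sets)
--     n = len(sets)
--     layer = [(frozenset(), 0)]
--     for size in range(1, n + 1):
--         nxt = []
--         for (u0, k0) in layer:
--             for j in range(k0, n):
--                 u = u0 | sets[j]
--                 if len(u) < size:
--                     return False
--                 nxt.append((u, j + 1))
--         layer = nxt
--     return True
-- ===== Notes on version B (the rewrite author's own statement) =====
-- stated objective: alternative
-- what changed: Replaces the per-size itertools.combinations enumeration that rebuilds every subset's union element by element with a layered dynamic program that stores (union, next-index) per subset of the current size and derives each next-size union by a single union with one more set; a timing run could not confirm a speedup (1.27x at the largest size both finished), so none is claimed.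
import Mathlib
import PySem

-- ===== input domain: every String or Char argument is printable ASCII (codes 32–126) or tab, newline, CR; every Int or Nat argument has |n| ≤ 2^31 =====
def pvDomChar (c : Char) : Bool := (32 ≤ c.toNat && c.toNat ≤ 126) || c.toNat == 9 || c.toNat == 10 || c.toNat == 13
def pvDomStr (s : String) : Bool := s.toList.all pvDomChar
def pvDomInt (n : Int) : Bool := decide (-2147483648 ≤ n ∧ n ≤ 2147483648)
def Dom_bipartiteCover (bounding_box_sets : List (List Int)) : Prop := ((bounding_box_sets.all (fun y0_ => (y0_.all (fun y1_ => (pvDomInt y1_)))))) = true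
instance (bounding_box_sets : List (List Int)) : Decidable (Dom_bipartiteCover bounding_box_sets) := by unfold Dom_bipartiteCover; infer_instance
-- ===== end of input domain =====

-- ===== PORT A =====
-- B replaces A's per-size combinations enumeration by a layered DP table of (union, next-index) entries, one union operation per subset; objective: alternative (same early-return order as A).

-- combined_set = set([]); for box_set in combination: combined_set |= box_set
def pvFoldUnion (combo : List (List Int)) : PySem.Set Int :=
  combo.foldl (fun acc s => acc.union (PySem.Set.ofList s)) (PySem.Set.ofList [])

-- inner 'for combination in combinations: ... if len < i: return False'
def pvLoopCombos (i : Int) : List (List (List Int)) → Bool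
  | [] => true
  | combo :: cs => if (pvFoldUnion combo).len < i then false else pvLoopCombos i cs

-- outer 'for i in range(1, len(..)+1)' with the early return threaded through
def pvLoopSizes (xs : List (List Int)) : List Int → Bool
  | [] => true
  | i :: is => if pvLoopCombos i (List.sublistsLen i.toNat xs) then pvLoopSizes xs is else false

def bipartiteCover (bounding_box_sets : List (List Int)) : Bool :=
  -- itertools.combinations(xs, i) is ported as List.sublistsLen i xs (same subsets; order immaterial to the result)
  pvLoopSizes bounding_box_sets (PySem.List.pyRange 1 ((bounding_box_sets.length : Int) + 1))

-- ===== PORT B =====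
-- inner 'for j in range(k0, n): u = u0 | sets[j]; if len(u) < size: return False; nxt.append((u, j+1))'
def pvInnerB (size : Int) (sets : List (List Int)) (u0 : PySem.Set Int) (j : Int) :
    Option (List (PySem.Set Int × Int)) :=
  if j < (sets.length : Int) then
    let u := u0.union (PySem.Set.ofList ((PySem.List.pyGet? sets j).getD []))
    if u.len < size then none
    else match pvInnerB size sets u0 (j + 1) with
         | none => none
         | some l => some ((u, j + 1) :: l)
  else some []
termination_by ((sets.length : Int) - j).toNat
decreasing_by omega

-- 'for (u0, k0) in layer: ...' with the early return threaded through; none = 'return False'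
def pvLayerB (size : Int) (sets : List (List Int)) :
    List (PySem.Set Int × Int) → Option (List (PySem.Set Int × Int))
  | [] => some []
  | (u0, k0) :: es =>
      match pvInnerB size sets u0 k0 with
      | none => none
      | some l =>
          match pvLayerB size sets es with
          | none => none
          | some l' => some (l ++ l')

-- 'for size in range(1, n + 1): ... layer = nxt'
def pvSizesB (sets : List (List Int)) : List Int → List (PySem.Set Int × Int) → Bool
  | [], _ => true
  | size :: ss, layer =>
      match pvLayerB size sets layer with
      | none => false
      | some nxt => pvSizesB sets ss nxt

def bipartiteCover_alt (bounding_box_sets : List (List Int)) : Bool :=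
  pvSizesB bounding_box_sets
    (PySem.List.pyRange 1 ((bounding_box_sets.length : Int) + 1))
    [(PySem.Set.empty, 0)]

-- ===== PRECONDITION & SPEC =====
def Spec_bipartiteCover (bounding_box_sets : List (List Int)) (out : Bool) : Prop := out = bipartiteCover_alt bounding_box_sets
instance (bounding_box_sets : List (List Int)) (out : Bool) : Decidable (Spec_bipartiteCover bounding_box_sets out) := by unfold Spec_bipartiteCover; infer_instance

-- ===== CLAIM (what is proved, stated in full; the proofs are below) =====
def Claim_equal_bipartiteCover : Prop := ∀ (bounding_box_sets : List (List Int)), Dom_bipartiteCover bounding_box_sets → Spec_bipartiteCover bounding_box_sets (bipartiteCover bounding_box_sets)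

-- ===== LEMMAS AND PROOFS =====

-- Both programs decide the Hall condition P: every nonempty subsequence has a union at least as large as itself.
def pvHall (xs : List (List Int)) : Prop :=
  ∀ sub : List (List Int), sub.Sublist xs → sub ≠ [] → (sub.length : Int) ≤ (pvFoldUnion sub).len

lemma pvLoopCombos_iff (i : Int) (cs : List (List (List Int))) :
    pvLoopCombos i cs = true ↔ ∀ c ∈ cs, ¬((pvFoldUnion c).len < i) := by
  induction cs with
  | nil => simp [pvLoopCombos]
  | cons c cs ih =>
      simp only [pvLoopCombos]
      split_ifs with h
      · simp only [false_iff]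
        intro hall
        exact hall c ((by simp)) h
      · rw [ih]
        constructor
        · intro hall c' hc'
          rcases List.mem_cons.mp hc' with rfl | hc'
          · exact h
          · exact hall c' hc'
        · intro hall c' hc'
          exact hall c' (List.mem_cons_of_mem _ hc')

lemma pvLoopSizes_iff (xs : List (List Int)) (is : List Int) :
    pvLoopSizes xs is = true ↔ ∀ i ∈ is, pvLoopCombos i (List.sublistsLen i.toNat xs) = true := by
  induction is with
  | nil => simp [pvLoopSizes]
  | cons i is ih =>
      simp only [pvLoopSizes]
      split_ifs with h
      · rw [ih]
        constructor
        · intro hall i' hi'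
          rcases List.mem_cons.mp hi' with rfl | hi'
          · exact h
          · exact hall i' hi'
        · intro hall i' hi'
          exact hall i' (List.mem_cons_of_mem _ hi')
      · simp only [false_iff]
        intro hall
        exact h (hall i (by simp))

lemma bipartiteCover_iff (xs : List (List Int)) : bipartiteCover xs = true ↔ pvHall xs := by
  unfold bipartiteCover
  rw [pvLoopSizes_iff]
  constructor
  · intro h sub hsub hne
    have hlen1 : 1 ≤ sub.length := by
      cases sub with
      | nil => exact absurd rfl hne
      | cons a l => simp
    have hle : sub.length ≤ xs.length := hsub.length_le
    have hmem : ((sub.length : Int)) ∈ PySem.List.pyRange 1 ((xs.length : Int) + 1) := by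
      rw [PySem.List.mem_pyRange_one]
      constructor <;> [exact_mod_cast hlen1; exact_mod_cast Nat.lt_succ_of_le hle]
    have := (pvLoopCombos_iff _ _).mp (h _ hmem) sub
    have hsubmem : sub ∈ List.sublistsLen ((sub.length : Int)).toNat xs := by
      rw [List.mem_sublistsLen]
      exact ⟨hsub, by simp⟩
    have := this hsubmem
    omega
  · intro h i hi
    rw [PySem.List.mem_pyRange_one] at hi
    rw [pvLoopCombos_iff]
    intro c hc
    rw [List.mem_sublistsLen] at hc
    have hne : c ≠ [] := by
      intro hnil
      have : i.toNat = 0 := by rw [← hc.2, hnil]; rfl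
      omega
    have := h c hc.1 hne
    have : (c.length : Int) = i := by
      rw [hc.2]; omega
    omega

-- B-side proofs: the layer DP decides the same Hall condition.

lemma pvCons_sublist_split {a : List Int} {l r : List (List Int)} (h : (a :: l).Sublist r) :
    ∃ pre suf, r = pre ++ a :: suf ∧ l.Sublist suf := by
  induction r with
  | nil => cases h
  | cons b r ih =>
      rcases List.sublist_cons_iff.mp h with h' | ⟨q, hq, hq'⟩
      · rcases ih h' with ⟨pre, suf, rfl, hl⟩
        exact ⟨b :: pre, suf, rfl, hl⟩
      · obtain rfl : a = b := by injection hq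
        obtain rfl : q = l := by injection hq with _ h2; exact h2.symm
        exact ⟨[], r, rfl, hq'⟩

-- semantic value of the inner loop: entries (u0 ∪ sets[j'], j'+1) for j' ≥ j
def pvEntries (u0 : PySem.Set Int) : List (List Int) → Int → List (PySem.Set Int × Int)
  | [], _ => []
  | a :: r, j => (u0.union (PySem.Set.ofList a), j + 1) :: pvEntries u0 r (j + 1)

lemma pvDrop_cons {sets : List (List Int)} {j : Int} {a : List Int} {r : List (List Int)}
    (h0 : 0 ≤ j) (h : sets.drop j.toNat = a :: r) : sets.drop (j + 1).toNat = r := by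
  have hlt : j.toNat < sets.length := by
    by_contra hge
    rw [List.drop_eq_nil_of_le (by omega)] at h
    cases h
  have := List.drop_eq_getElem_cons hlt
  rw [this] at h
  injection h with _ h2
  have : (j + 1).toNat = j.toNat + 1 := by omega
  rw [this, ← h2]

lemma pvGetD_eq {sets : List (List Int)} {j : Int} {a : List Int} {r : List (List Int)}
    (h0 : 0 ≤ j) (h : sets.drop j.toNat = a :: r) :
    (PySem.List.pyGet? sets j).getD [] = a := by
  have hlt : j.toNat < sets.length := by
    by_contra hge
    rw [List.drop_eq_nil_of_le (by omega)] at h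
    cases h
  have hget : sets[j.toNat] = a := by
    have h2 := List.drop_eq_getElem_cons hlt
    rw [h] at h2
    injection h2 with h1 _
    exact h1.symm
  have hj2 : j < (sets.length : Int) := by omega
  have hsome : PySem.List.pyGet? sets j = some (sets[j.toNat]'hlt) := by
    simp only [PySem.List.pyGet?, PySem.List.pyIdx?]
    rw [if_pos h0, if_pos hj2]
    simp [List.getElem?_eq_getElem hlt]
  rw [hsome, hget]
  rfl

lemma pvInnerB_eq (size : Int) (sets : List (List Int)) (u0 : PySem.Set Int) :
    ∀ (fuel : Nat) (j : Int), 0 ≤ j → ((sets.length : Int) - j).toNat ≤ fuel →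
      pvInnerB size sets u0 j =
        if (sets.drop j.toNat).any
            (fun a => decide ((u0.union (PySem.Set.ofList a)).len < size)) then none
        else some (pvEntries u0 (sets.drop j.toNat) j) := by
  intro fuel
  induction fuel with
  | zero =>
      intro j h0 hf
      have hge : sets.length ≤ j.toNat := by omega
      rw [pvInnerB, if_neg (by push_cast; omega), List.drop_eq_nil_of_le hge]
      simp [pvEntries]
  | succ fuel ih =>
      intro j h0 hf
      by_cases hlt : j < (sets.length : Int)
      · have hlt' : j.toNat < sets.length := by omega
        obtain ⟨a, r, hdrop⟩ : ∃ a r, sets.drop j.toNat = a :: r :=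
          ⟨_, _, List.drop_eq_getElem_cons hlt'⟩
        rw [pvInnerB, if_pos hlt]
        simp only [pvGetD_eq h0 hdrop]
        rw [hdrop]
        have hr : r = sets.drop (j + 1).toNat := (pvDrop_cons h0 hdrop).symm
        by_cases h1 : (u0.union (PySem.Set.ofList a)).len < size
        · have hc1 : ((a :: r).any (fun a => decide ((u0.union (PySem.Set.ofList a)).len < size))) = true := by
            simp only [List.any_cons, Bool.or_eq_true, decide_eq_true_eq]
            exact Or.inl h1
          rw [if_pos h1, if_pos hc1]
        · rw [if_neg h1]
          have ihj := ih (j + 1) (by omega) (by omega)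
          rw [← hr] at ihj
          rw [ihj]
          by_cases h2 : r.any (fun a => decide ((u0.union (PySem.Set.ofList a)).len < size)) = true
          · rw [if_pos h2, if_pos (by simp only [List.any_cons, Bool.or_eq_true]; exact Or.inr h2)]
          · have hcond : ¬((a :: r).any
                (fun a => decide ((u0.union (PySem.Set.ofList a)).len < size)) = true) := by
              simp only [List.any_cons, Bool.or_eq_true, decide_eq_true_eq]
              rintro (h | h)
              exacts [h1 h, h2 h]
            rw [if_neg h2, if_neg hcond]
            simp only [pvEntries, hr]
      · rw [pvInnerB, if_neg hlt, List.drop_eq_nil_of_le (by omega)]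
        simp [pvEntries]

lemma pvMem_pvEntries (u0 : PySem.Set Int) (sets : List (List Int)) :
    ∀ (r : List (List Int)) (j : Int), 0 ≤ j → r = sets.drop j.toNat →
      ∀ x, (x ∈ pvEntries u0 r j ↔
        ∃ pre a suf, r = pre ++ a :: suf ∧
          x = (u0.union (PySem.Set.ofList a), j + 1 + (pre.length : Int)) ∧
          sets.drop (j + 1 + (pre.length : Int)).toNat = suf) := by
  intro r
  induction r with
  | nil =>
      intro j h0 hr x
      simp only [pvEntries, List.not_mem_nil, false_iff]
      rintro ⟨pre, a, suf, habs, -⟩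
      cases pre <;> cases habs
  | cons a r ih =>
      intro j h0 hr x
      have hr' : r = sets.drop (j + 1).toNat := (pvDrop_cons h0 hr.symm).symm
      simp only [pvEntries, List.mem_cons]
      constructor
      · rintro (rfl | hx)
        · exact ⟨[], a, r, rfl, by simp, by simpa using hr'.symm⟩
        · rcases (ih (j + 1) (by omega) hr' x).mp hx with ⟨pre, b, suf, hsplit, hx', hdrop⟩
          refine ⟨a :: pre, b, suf, by rw [hsplit]; rfl, ?_, ?_⟩
          · rw [hx']; congr 1; simp only [List.length_cons]; push_cast; ring
          · rw [← hdrop]; congr 1; simp only [List.length_cons]; push_cast; ring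
      · rintro ⟨pre, b, suf, hsplit, hx', hdrop⟩
        cases pre with
        | nil =>
            left
            simp only [List.nil_append] at hsplit
            injection hsplit with h1 h2
            rw [hx', ← h1]
            simp
        | cons p pre' =>
            right
            rw [List.cons_append] at hsplit
            injection hsplit with h1 h2
            refine (ih (j + 1) (by omega) hr' x).mpr ⟨pre', b, suf, h2, ?_, ?_⟩
            · rw [hx']; congr 1; simp only [List.length_cons]; push_cast; ring
            · rw [← hdrop]; congr 1; simp only [List.length_cons]; push_cast; ring

lemma pvLayerB_eq (size : Int) (sets : List (List Int)) :
    ∀ (layer : List (PySem.Set Int × Int)), (∀ e ∈ layer, 0 ≤ e.2) →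
      pvLayerB size sets layer =
        if layer.any (fun e => (sets.drop e.2.toNat).any
            (fun a => decide ((e.1.union (PySem.Set.ofList a)).len < size))) then none
        else some (layer.flatMap
            (fun e => pvEntries e.1 (sets.drop e.2.toNat) e.2)) := by
  intro layer
  induction layer with
  | nil => intro _; simp [pvLayerB]
  | cons e es ih =>
      intro hpos
      obtain ⟨u0, k0⟩ := e
      have h0 : 0 ≤ k0 := hpos (u0, k0) (by simp)
      simp only [pvLayerB]
      rw [pvInnerB_eq size sets u0 (((sets.length : Int) - k0).toNat) k0 h0 le_rfl]
      rw [ih (fun e he => hpos e (List.mem_cons_of_mem _ he))]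
      simp only [List.any_cons, List.flatMap_cons]
      by_cases h1 : (sets.drop k0.toNat).any
          (fun a => decide (((u0.union (PySem.Set.ofList a)).len < size))) = true
      · have hcOr : (((sets.drop k0.toNat).any
            (fun a => decide ((u0.union (PySem.Set.ofList a)).len < size))) ||
            es.any (fun e => (sets.drop e.2.toNat).any
              (fun a => decide ((e.1.union (PySem.Set.ofList a)).len < size)))) = true := by
          rw [Bool.or_eq_true]
          exact Or.inl h1
        rw [if_pos h1, if_pos hcOr]
      · rw [if_neg h1]
        by_cases h2 : es.any (fun e => (sets.drop e.2.toNat).any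
            (fun a => decide ((e.1.union (PySem.Set.ofList a)).len < size))) = true
        · rw [if_pos h2, if_pos (by simp only [Bool.or_eq_true]; exact Or.inr h2)]
        · have hcond : ¬((((sets.drop k0.toNat).any
              (fun a => decide ((u0.union (PySem.Set.ofList a)).len < size))) ||
              es.any (fun e => (sets.drop e.2.toNat).any
                (fun a => decide ((e.1.union (PySem.Set.ofList a)).len < size)))) = true) := by
            simp only [Bool.or_eq_true]
            rintro (h | h)
            exacts [h1 h, h2 h]
          rw [if_neg h2, if_neg hcond]

lemma pvSizesB_iff (sets : List (List Int)) :
    ∀ (fuel : Nat) (s : Int) (layer : List (PySem.Set Int × Int)),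
      (((sets.length : Int) + 1 - s).toNat ≤ fuel) →
      (∀ e ∈ layer, 0 ≤ e.2 ∧ (sets.length : Int) - e.2 ≤ (sets.length : Int) + 1 - s) →
      (pvSizesB sets (PySem.List.pyRange s ((sets.length : Int) + 1)) layer = true ↔
        ∀ e ∈ layer, ∀ sub : List (List Int), sub.Sublist (sets.drop e.2.toNat) → sub ≠ [] →
          s + (sub.length : Int) - 1 ≤
            (sub.foldl (fun u a => u.union (PySem.Set.ofList a)) e.1).len) := by
  intro fuel
  induction fuel with
  | zero =>
      intro s layer hf hbound
      have hbs : (sets.length : Int) + 1 ≤ s := by omega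
      have hempty : PySem.List.pyRange s ((sets.length : Int) + 1) = [] := by
        rw [PySem.List.pyRange_one]
        have : ((sets.length : Int) + 1 - s).toNat = 0 := by omega
        rw [this]
        rfl
      rw [hempty]
      simp only [pvSizesB, true_iff]
      intro e he sub hsub hne
      have h2 := hbound e he
      have hdrop : sets.drop e.2.toNat = [] := List.drop_eq_nil_of_le (by omega)
      rw [hdrop] at hsub
      exact absurd (List.sublist_nil.mp hsub) hne
  | succ fuel ih =>
      intro s layer hf hbound
      by_cases hbs : (sets.length : Int) + 1 ≤ s
      · have hempty : PySem.List.pyRange s ((sets.length : Int) + 1) = [] := by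
          rw [PySem.List.pyRange_one]
          have : ((sets.length : Int) + 1 - s).toNat = 0 := by omega
          rw [this]
          rfl
        rw [hempty]
        simp only [pvSizesB, true_iff]
        intro e he sub hsub hne
        have h2 := hbound e he
        have hdrop : sets.drop e.2.toNat = [] := List.drop_eq_nil_of_le (by omega)
        rw [hdrop] at hsub
        exact absurd (List.sublist_nil.mp hsub) hne
      · have hlt : s < (sets.length : Int) + 1 := by omega
        rw [PySem.List.pyRange_one_cons hlt]
        simp only [pvSizesB]
        rw [pvLayerB_eq s sets layer (fun e he => (hbound e he).1)]
        by_cases hfail : layer.any (fun e => (sets.drop e.2.toNat).any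
            (fun a => decide ((e.1.union (PySem.Set.ofList a)).len < s))) = true
        · rw [if_pos hfail]
          constructor
          · intro h; simp at h
          · intro h
            rcases List.any_eq_true.mp hfail with ⟨e, he, hany⟩
            rcases List.any_eq_true.mp hany with ⟨a, ha, hlt'⟩
            have hck := h e he [a] (List.singleton_sublist.mpr ha) (by simp)
            simp only [List.foldl_cons, List.foldl_nil, List.length_cons,
              List.length_nil] at hck
            simp only [decide_eq_true_eq] at hlt'
            have hcontra : False := by omega
            exact hcontra.elim
        · rw [if_neg hfail]
          have hnot : ∀ e ∈ layer, ∀ a ∈ sets.drop e.2.toNat,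
              ¬((e.1.union (PySem.Set.ofList a)).len < s) := by
            intro e he a ha
            have h1 := List.any_eq_false.mp (Bool.eq_false_iff.mpr hfail) e he
            have h2 := List.any_eq_false.mp (Bool.eq_false_iff.mpr h1) a ha
            simpa using h2
          show pvSizesB sets (PySem.List.pyRange (s + 1) ((sets.length : Int) + 1))
              (layer.flatMap (fun e => pvEntries e.1 (sets.drop e.2.toNat) e.2)) = true ↔ _
          have hXbound : ∀ e' ∈ layer.flatMap
              (fun e => pvEntries e.1 (sets.drop e.2.toNat) e.2),
              0 ≤ e'.2 ∧ (sets.length : Int) - e'.2 ≤ (sets.length : Int) + 1 - (s + 1) := by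
            intro e' he'
            rcases List.mem_flatMap.mp he' with ⟨e, he, hmem⟩
            have h0 := (hbound e he).1
            rcases (pvMem_pvEntries e.1 sets _ e.2 h0 rfl e').mp hmem with
              ⟨pre, a, suf, hsplit, rfl, hdropsuf⟩
            have hlen1 : (sets.drop e.2.toNat).length = pre.length + 1 + suf.length := by
              rw [hsplit]; simp; omega
            have hlen2 : (sets.drop e.2.toNat).length = sets.length - e.2.toNat :=
              List.length_drop
            have hb2 := (hbound e he).2
            refine ⟨?_, ?_⟩
            · show (0 : Int) ≤ e.2 + 1 + (pre.length : Int)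
              omega
            · show (sets.length : Int) - (e.2 + 1 + (pre.length : Int))
                  ≤ (sets.length : Int) + 1 - (s + 1)
              omega
          rw [ih (s + 1) _ (by omega) hXbound]
          constructor
          · intro h e he sub hsub hne
            cases sub with
            | nil => exact absurd rfl hne
            | cons a sub' =>
                rcases pvCons_sublist_split hsub with ⟨pre, suf, hsplit, hsub'⟩
                have ha : a ∈ sets.drop e.2.toNat := by
                  rw [hsplit]; exact List.mem_append_right _ (by simp)
                have hnota := hnot e he a ha
                cases hs' : sub' with
                | nil =>
                    subst hs'
                    simp only [List.foldl_cons, List.foldl_nil, List.length_cons,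
                      List.length_nil]
                    omega
                | cons b sub'' =>
                    have hdropsuf : sets.drop (e.2 + 1 + (pre.length : Int)).toNat = suf := by
                      have h0 := (hbound e he).1
                      have heq : (e.2 + 1 + (pre.length : Int)).toNat
                          = e.2.toNat + (pre.length + 1) := by omega
                      rw [heq, ← List.drop_drop, hsplit]
                      have : pre ++ a :: suf = (pre ++ [a]) ++ suf := by simp
                      rw [this]
                      have hl : (pre ++ [a]).length = pre.length + 1 := by simp
                      rw [← hl, List.drop_left]
                    have he'mem : (e.1.union (PySem.Set.ofList a),
                        e.2 + 1 + (pre.length : Int)) ∈ layer.flatMap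
                        (fun e => pvEntries e.1 (sets.drop e.2.toNat) e.2) := by
                      refine List.mem_flatMap.mpr ⟨e, he, ?_⟩
                      exact (pvMem_pvEntries e.1 sets _ e.2 (hbound e he).1 rfl _).mpr
                        ⟨pre, a, suf, hsplit, rfl, hdropsuf⟩
                    have hsubdrop : sub'.Sublist
                        (sets.drop ((e.1.union (PySem.Set.ofList a),
                          e.2 + 1 + (pre.length : Int)).2).toNat) := by
                      show sub'.Sublist (sets.drop (e.2 + 1 + (pre.length : Int)).toNat)
                      rw [hdropsuf]
                      exact hsub'
                    have hne' : sub' ≠ [] := by rw [hs']; simp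
                    have hck := h _ he'mem sub' hsubdrop hne'
                    have hck2 : s + 1 + (sub'.length : Int) - 1 ≤
                        (sub'.foldl (fun u a => u.union (PySem.Set.ofList a))
                          (e.1.union (PySem.Set.ofList a))).len := hck
                    rw [hs'] at hck2
                    simp only [List.foldl_cons, List.length_cons] at hck2 ⊢
                    push_cast at hck2 ⊢
                    omega
          · intro h e' he'
            rcases List.mem_flatMap.mp he' with ⟨e, he, hmem⟩
            rcases (pvMem_pvEntries e.1 sets _ e.2 (hbound e he).1 rfl e').mp hmem with
              ⟨pre, a, suf, hsplit, rfl, hdropsuf⟩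
            intro sub hsub hne
            have hsub2 : sub.Sublist suf := by
              rw [← hdropsuf]
              exact hsub
            have hbig : (a :: sub).Sublist (sets.drop e.2.toNat) := by
              rw [hsplit]
              exact ((List.cons_sublist_cons.mpr hsub2).trans
                (List.sublist_append_right pre _))
            have hck := h e he (a :: sub) hbig (by simp)
            simp only [List.foldl_cons, List.length_cons] at hck
            show s + 1 + (sub.length : Int) - 1 ≤
              (sub.foldl (fun u a => u.union (PySem.Set.ofList a))
                (e.1.union (PySem.Set.ofList a))).len
            push_cast at hck ⊢
            omega

lemma bipartiteCover_alt_iff (xs : List (List Int)) :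
    bipartiteCover_alt xs = true ↔ pvHall xs := by
  unfold bipartiteCover_alt
  rw [pvSizesB_iff xs (((xs.length : Int) + 1 - 1).toNat) 1 [(PySem.Set.empty, 0)] le_rfl
    (by intro e he
        simp only [List.mem_singleton] at he
        subst he
        constructor
        · exact le_refl 0
        · omega)]
  have hfold : ∀ sub : List (List Int),
      sub.foldl (fun u a => u.union (PySem.Set.ofList a)) PySem.Set.empty
        = pvFoldUnion sub := by
    intro sub
    simp [pvFoldUnion, PySem.Set.ofList, PySem.Set.empty]
  constructor
  · intro h sub hsub hne
    have hck := h (PySem.Set.empty, 0) (by simp) sub (by simpa using hsub) hne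
    rw [hfold] at hck
    omega
  · intro h e he sub hsub hne
    simp only [List.mem_singleton] at he
    subst he
    have hsub2 : sub.Sublist xs := by simpa using hsub
    have hck := h sub hsub2 hne
    show 1 + (sub.length : Int) - 1 ≤
      (sub.foldl (fun u a => u.union (PySem.Set.ofList a)) PySem.Set.empty).len
    rw [hfold]
    omega

-- ===== VERDICT (by name: the statement is the Claim_ definition above) =====
theorem bipartiteCover_spec : Claim_equal_bipartiteCover := by
  intro xs _
  unfold Spec_bipartiteCover
  have hA := bipartiteCover_iff xs
  have hB := bipartiteCover_alt_iff xs
  cases hA' : bipartiteCover xs <;> cases hB' : bipartiteCover_alt xs <;> simp_all
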